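-- pv_equiv track=rewrite | github.com/WheelWeight/cards | d_t.py | lwct
-- ===== SOURCE A (Python) =====
-- def wct(table,n):
--     """
--     the weight of the column of the table
--     表格中此列宽度
--     """
--     llc = []#a list for lens of the column:存储
--
--     for line in table:
--         llc.append(len(line[n].encode()))#存储此竖列每项的长度
--
--     return max(llc)#返回最大值
--
-- def lwct(table):
--     """
--     a list for the weights of all the columns of the table
--     一个包含 表格中所有列宽度的 列表
--     """
--     lwct = []
--     nl = len(table[0])#the number of lines:存储列数即横排项数，尽量减少计算量
--
--     i = 0#指向第一项
--     for topic in table[0]: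
--         lwct.append(wct(table,i))#求出并存储 此竖列每项应占格数量
--         i += 1#递增
--
--     return lwct
-- ===== SOURCE B (Python) =====
-- def lwct(table):
--     result = [0] * len(table[0])
--     for line in table:
--         for i in range(len(result)):
--             n = len(line[i].encode())
--             if n > result[i]:
--                 result[i] = n
--     return result
-- ===== Notes on version B (the rewrite author's own statement) =====
-- stated objective: simpler
-- what changed: Drops the per-column helper and the intermediate per-column length lists: B makes one row-major pass keeping a running maximum per column instead of column-major passes that collect all lengths and call max().
import Mathlib
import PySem

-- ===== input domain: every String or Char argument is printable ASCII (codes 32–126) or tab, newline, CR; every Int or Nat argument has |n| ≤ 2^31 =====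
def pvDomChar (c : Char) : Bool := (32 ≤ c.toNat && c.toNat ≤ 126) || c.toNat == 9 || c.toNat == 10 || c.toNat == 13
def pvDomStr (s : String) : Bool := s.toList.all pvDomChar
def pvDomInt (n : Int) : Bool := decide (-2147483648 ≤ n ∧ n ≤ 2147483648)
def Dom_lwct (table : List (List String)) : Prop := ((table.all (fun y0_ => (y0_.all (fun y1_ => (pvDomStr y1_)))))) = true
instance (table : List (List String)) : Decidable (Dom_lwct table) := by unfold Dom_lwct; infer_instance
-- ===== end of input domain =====

-- B replaces A's column-major helper-with-max() decomposition by one row-major pass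
-- keeping a running per-column maximum; objective: simpler, same return value on Pre_.


-- ===== PORT A =====
-- len(line[n].encode()) is ported as PySem.Str.len of the indexed string: exact on the
-- stated ASCII domain, where every character is one UTF-8 byte.
def wct (table : List (List String)) (n : Int) : Int :=
  let llc : List Int :=
    table.foldl (fun acc line =>
      acc ++ [PySem.Str.len ((PySem.List.pyGet? line n).getD "")]) []
  (PySem.List.max? llc (fun y => y)).getD 0

def lwct (table : List (List String)) : List Int :=
  let row0 := table.headD []
  ((row0.foldl (fun (st : List Int × Int) _ =>
      (st.1 ++ [wct table st.2], st.2 + 1)) (([] : List Int), (0 : Int)))).1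

-- ===== PORT B =====
def lwct_alt (table : List (List String)) : List Int :=
  let row0 := table.headD []
  table.foldl (fun res line =>
      res.mapIdx (fun i r =>
        let n := PySem.Str.len ((PySem.List.pyGet? line (i : Int)).getD "")
        if n > r then n else r))
    (List.replicate row0.length 0)

-- ===== PRECONDITION & SPEC =====
-- Python A raises IndexError on an empty table (table[0]) and on tables with a row
-- shorter than the first row (line[n] in wct); exactly those inputs are excluded.
def Pre_lwct (table : List (List String)) : Prop :=
  table ≠ [] ∧ ∀ line ∈ table, (table.headD []).length ≤ line.length
instance (table : List (List String)) : Decidable (Pre_lwct table) := by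
  unfold Pre_lwct; infer_instance

def pvWitness_lwct : List (List String) := [["ab", "c"], ["d", "efg"]]

def Spec_lwct (table : List (List String)) (out : List Int) : Prop := out = lwct_alt table
instance (table : List (List String)) (out : List Int) : Decidable (Spec_lwct table out) := by unfold Spec_lwct; infer_instance

-- ===== CLAIM (what is proved, stated in full; the proofs are below) =====
def Claim_equal_lwct : Prop := ∀ (table : List (List String)), Dom_lwct table → Pre_lwct table → Spec_lwct table (lwct table)

-- ===== LEMMAS AND PROOFS =====

-- byte length of the entry of `line` in column `i` (both ports compute this value)
def pvCol (line : List String) (i : Nat) : Int :=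
  PySem.Str.len ((PySem.List.pyGet? line (i : Int)).getD "")

lemma pvCol_def (line : List String) (i : Nat) :
    PySem.Str.len ((PySem.List.pyGet? line (i : Int)).getD "") = pvCol line i := rfl

lemma pvCol_nonneg (line : List String) (i : Nat) : 0 ≤ pvCol line i := by
  simp [pvCol]

-- A's outer loop (fold carrying the list-so-far and an Int counter) = map over range
lemma foldl_counter {α : Type} (h : Int → Int) :
    ∀ (l : List α) (acc : List Int) (k : Int),
    (l.foldl (fun (st : List Int × Int) _ => (st.1 ++ [h st.2], st.2 + 1)) (acc, k)).1
      = acc ++ (List.range l.length).map (fun (j : Nat) => h (k + (j : Int))) := by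
  intro l
  induction l with
  | nil => simp
  | cons x t ih =>
      intro acc k
      rw [List.foldl_cons, ih, List.length_cons, List.range_succ_eq_map,
        List.map_cons, List.map_map]
      simp only [Nat.cast_zero, add_zero, List.append_assoc, List.singleton_append]
      congr 2
      apply List.map_congr_left
      intro j _
      simp only [Function.comp_apply]
      congr 1
      push_cast
      ring

-- A's inner loop builds the list of column lengths
lemma foldl_append_map {α β : Type} (f : α → β) :
    ∀ (l : List α) (acc : List β),
    l.foldl (fun a x => a ++ [f x]) acc = acc ++ l.map f := by
  intro l
  induction l with
  | nil => simp
  | cons x t ih => intro acc; simp [ih]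

-- A's per-column value, on a nonempty table, is the running max from 0
lemma wct_eq_runningMax (a : List String) (rest : List (List String)) (i : Nat) :
    wct (a :: rest) (i : Int)
      = rest.foldl (fun m line => max m (pvCol line i)) (pvCol a i) := by
  unfold wct
  rw [foldl_append_map]
  simp only [List.nil_append, List.map_cons, PySem.List.max?_id_cons, Option.getD_some]
  rw [List.foldl_map]
  rfl

-- mapIdx over a range-map is a range-map
lemma mapIdx_map_range {β : Type} (h : Nat → β → β) (c : Nat → β) (n : Nat) :
    List.mapIdx h ((List.range n).map c) = (List.range n).map (fun i => h i (c i)) := by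
  apply List.ext_getElem
  · simp
  · intro j h1 h2
    simp

-- B's fold invariant: each column keeps its own running max
lemma alt_invariant (n : Nat) :
    ∀ (t : List (List String)) (c : Nat → Int),
    t.foldl (fun res line =>
        res.mapIdx (fun i r => if pvCol line i > r then pvCol line i else r))
      ((List.range n).map c)
      = (List.range n).map (fun i => t.foldl (fun m line => max m (pvCol line i)) (c i)) := by
  intro t
  induction t with
  | nil => intro c; simp
  | cons line rest ih =>
      intro c
      simp only [List.foldl_cons, mapIdx_map_range, ih]
      apply List.map_congr_left
      intro i _
      congr 1
      rw [max_comm]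
      simp only [max_def]
      split_ifs with h1 h2 h2 <;> omega

lemma replicate_eq_range_map (n : Nat) :
    (List.replicate n (0 : Int)) = (List.range n).map (fun _ => (0 : Int)) := by
  simp

-- ===== VERDICT (by name: the statement is the Claim_ definition above) =====
theorem lwct_spec : Claim_equal_lwct := by
  intro table _ hpre
  obtain ⟨hne, _⟩ := hpre
  obtain ⟨a, rest, rfl⟩ : ∃ x xs, table = x :: xs := by
    cases table with
    | nil => exact absurd rfl hne
    | cons x xs => exact ⟨x, xs, rfl⟩
  unfold Spec_lwct lwct lwct_alt
  simp only [List.headD_cons]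
  rw [replicate_eq_range_map]
  simp only [pvCol_def]
  rw [alt_invariant, foldl_counter (fun k => wct (a :: rest) k)]
  simp only [List.nil_append]
  apply List.map_congr_left
  intro i _
  rw [show ((0 : Int) + (i : Int)) = (i : Int) by ring, wct_eq_runningMax]
  have h0 : pvCol a i = max 0 (pvCol a i) := by
    have := pvCol_nonneg a i; omega
  rw [h0]
  rfl
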